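-- pv_equiv track=rewrite | github.com/christoph-luescher/babylon-address-verifier | babylon_address_verifier.py | select_bbn_params
-- ===== SOURCE A (Python) =====
-- from typing import List, Tuple, Optional, Any, Dict
--
-- def select_bbn_params(bbn_list: List[dict], block_height: Optional[int]) -> dict:
--     """
--     Select a parameter set from params.bbn[] based on BTC height:
--       - Prefer entries where btc_activation_height <= block <= allow_list_expiration_height (if expiration > 0)
--       - If multiple match, pick the one with the greatest btc_activation_height
--       - If none match and block is given, pick the one with max btc_activation_height <= block
--       - Else fall back to entry with the greatest btc_activation_height
--     """
--     if not bbn_list: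
--         raise ValueError("API returned empty params.bbn[] list")
--
--     def activation(p): return int(p.get("btc_activation_height", 0))
--     def expiration(p): return int(p.get("allow_list_expiration_height", 0))
--
--     bbn_sorted = sorted(bbn_list, key=activation)
--     if block_height is None:
--         return bbn_sorted[-1]
--
--     # exact active window match
--     candidates = []
--     for p in bbn_sorted:
--         act = activation(p)
--         exp = expiration(p)
--         if act <= block_height and (exp == 0 or block_height <= exp):
--             candidates.append(p)
--     if candidates:
--         return sorted(candidates, key=activation)[-1]
--
--     # otherwise, latest activation <= block
--     past = [p for p in bbn_sorted if activation(p) <= block_height]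
--     if past:
--         return sorted(past, key=activation)[-1]
--
--     # fallback to latest overall
--     return bbn_sorted[-1]
-- ===== SOURCE B (Python) =====
-- def select_bbn_params(bbn_list, block_height):
--     """Single-pass selection: rank each entry (2 = active window, 1 = activated,
--     0 = not yet activated / no height given) and keep the entry with the greatest
--     (rank, activation) key, later entries winning ties."""
--     if not bbn_list:
--         raise ValueError("API returned empty params.bbn[] list")
--
--     def key(p):
--         act = int(p.get("btc_activation_height", 0))
--         if block_height is None:
--             return (0, act)
--         exp = int(p.get("allow_list_expiration_height", 0))
--         if act <= block_height and (exp == 0 or block_height <= exp):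
--             return (2, act)
--         if act <= block_height:
--             return (1, act)
--         return (0, act)
--
--     best = bbn_list[0]
--     best_key = key(best)
--     for p in bbn_list[1:]:
--         k = key(p)
--         if k >= best_key:
--             best, best_key = p, k
--     return best
-- ===== Notes on version B (the rewrite author's own statement) =====
-- stated objective: alternative
-- what changed: Replaces the three sort-and-filter passes with a single left-to-right scan that keeps the entry maximizing a lexicographic (rank, activation) key, where rank 2 = inside the active window, 1 = activated, 0 = otherwise; >= on ties reproduces the stable-sort last-occurrence choice.
import Mathlib
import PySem

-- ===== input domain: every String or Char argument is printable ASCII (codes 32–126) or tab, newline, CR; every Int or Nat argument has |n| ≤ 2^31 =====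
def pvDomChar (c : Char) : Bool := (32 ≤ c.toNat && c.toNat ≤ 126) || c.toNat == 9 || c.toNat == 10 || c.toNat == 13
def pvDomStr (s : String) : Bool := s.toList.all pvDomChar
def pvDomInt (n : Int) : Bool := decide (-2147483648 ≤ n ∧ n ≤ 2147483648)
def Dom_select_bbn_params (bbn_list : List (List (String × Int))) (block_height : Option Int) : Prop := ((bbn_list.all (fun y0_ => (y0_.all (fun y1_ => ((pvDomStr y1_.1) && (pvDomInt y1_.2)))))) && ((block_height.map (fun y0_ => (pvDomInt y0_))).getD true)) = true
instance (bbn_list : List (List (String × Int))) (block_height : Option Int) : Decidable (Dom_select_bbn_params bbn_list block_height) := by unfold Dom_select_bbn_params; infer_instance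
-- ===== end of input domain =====

-- B replaces A's three sort-and-filter passes by one linear scan that keeps the entry with the
-- greatest lexicographic (rank, activation) key (rank 2 = inside active window, 1 = activated,
-- 0 = otherwise), later entries winning ties — objective: alternative (a different algorithm).

-- ===== PORT A =====
-- helpers shared by both ports: int(p.get("btc_activation_height", 0)) / int(p.get("allow_list_expiration_height", 0))
def pvAct (p : List (String × Int)) : Int := PySem.Dict.getD (PySem.Dict.mk p) "btc_activation_height" 0
def pvExp (p : List (String × Int)) : Int := PySem.Dict.getD (PySem.Dict.mk p) "allow_list_expiration_height" 0

def select_bbn_params (bbn_list : List (List (String × Int))) (block_height : Option Int) : List (String × Int) :=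
  if bbn_list = [] then []   -- Python raises ValueError here; excluded by Pre_
  else
    let bbn_sorted := PySem.List.sorted bbn_list pvAct false
    match block_height with
    | none => PySem.List.pyGetD bbn_sorted (-1) []
    | some bh =>
      -- exact active window match (the candidates-append loop)
      let candidates := bbn_sorted.foldl
        (fun acc p => if pvAct p ≤ bh ∧ (pvExp p = 0 ∨ bh ≤ pvExp p) then acc ++ [p] else acc) []
      if candidates ≠ [] then
        PySem.List.pyGetD (PySem.List.sorted candidates pvAct false) (-1) []
      else
        -- otherwise, latest activation <= block
        let past := bbn_sorted.filter (fun p => decide (pvAct p ≤ bh))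
        if past ≠ [] then
          PySem.List.pyGetD (PySem.List.sorted past pvAct false) (-1) []
        else
          -- fallback to latest overall
          PySem.List.pyGetD bbn_sorted (-1) []

-- ===== PORT B =====
-- key(p) of Source B: (0, act) when block_height is None, else (rank, act)
def pvKey (block_height : Option Int) (p : List (String × Int)) : Int × Int :=
  let act := pvAct p
  match block_height with
  | none => (0, act)
  | some bh =>
    let ex := pvExp p
    if act ≤ bh ∧ (ex = 0 ∨ bh ≤ ex) then (2, act)
    else if act ≤ bh then (1, act)
    else (0, act)

-- Python tuple comparison k1 >= k2 on int pairs (lexicographic)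
def pvGe (k1 k2 : Int × Int) : Bool := decide (k2.1 < k1.1 ∨ (k1.1 = k2.1 ∧ k2.2 ≤ k1.2))

def select_bbn_params_alt (bbn_list : List (List (String × Int))) (block_height : Option Int) : List (String × Int) :=
  match bbn_list with
  | [] => []   -- Python raises ValueError here; excluded by Pre_
  | p0 :: rest =>
    (rest.foldl
      (fun st p =>
        let k := pvKey block_height p
        if pvGe k st.2 then (p, k) else st)
      (p0, pvKey block_height p0)).1

-- ===== PRECONDITION & SPEC =====
-- Python A raises ValueError exactly on the empty list; everything else returns normally.
def Pre_select_bbn_params (bbn_list : List (List (String × Int))) (block_height : Option Int) : Prop :=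
  bbn_list ≠ []
instance (bbn_list : List (List (String × Int))) (block_height : Option Int) : Decidable (Pre_select_bbn_params bbn_list block_height) := by unfold Pre_select_bbn_params; infer_instance

def pvWitness_select_bbn_params : (List (List (String × Int))) × Option Int :=
  ([[("btc_activation_height", 1)], [("btc_activation_height", 3), ("allow_list_expiration_height", 5)]], some 4)

def Spec_select_bbn_params (bbn_list : List (List (String × Int))) (block_height : Option Int) (out : List (String × Int)) : Prop := out = select_bbn_params_alt bbn_list block_height
instance (bbn_list : List (List (String × Int))) (block_height : Option Int) (out : List (String × Int)) : Decidable (Spec_select_bbn_params bbn_list block_height out) := by unfold Spec_select_bbn_params; infer_instance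

-- ===== CLAIM (what is proved, stated in full; the proofs are below) =====
def Claim_equal_select_bbn_params : Prop := ∀ (bbn_list : List (List (String × Int))) (block_height : Option Int), Dom_select_bbn_params bbn_list block_height → Pre_select_bbn_params bbn_list block_height → Spec_select_bbn_params bbn_list block_height (select_bbn_params bbn_list block_height)

-- ===== LEMMAS AND PROOFS =====

-- last argmax of pvAct (an earlier element wins only strictly; = the LAST element with maximal key)
def pvLam : List (List (String × Int)) → Option (List (String × Int))
  | [] => none
  | p :: xs =>
    match pvLam xs with
    | none => some p
    | some q => if pvAct q < pvAct p then some p else some q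

-- strict lexicographic > on int pairs
def pvGt (k1 k2 : Int × Int) : Bool := decide (k2.1 < k1.1 ∨ (k1.1 = k2.1 ∧ k2.2 < k1.2))

-- last argmax of the lexicographic key pvKey
def pvLamK (b? : Option Int) : List (List (String × Int)) → Option (List (String × Int))
  | [] => none
  | p :: xs =>
    match pvLamK b? xs with
    | none => some p
    | some q => if pvGt (pvKey b? p) (pvKey b? q) then some p else some q

-- the Bool forms of A's two filters
def pvP2 (bh : Int) (p : List (String × Int)) : Bool := decide (pvAct p ≤ bh ∧ (pvExp p = 0 ∨ bh ≤ pvExp p))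
def pvP1 (bh : Int) (p : List (String × Int)) : Bool := decide (pvAct p ≤ bh)

def pvBef (a b : List (String × Int)) : Bool := decide (pvAct a < pvAct b)

lemma pvLam_eq_none (xs : List (List (String × Int))) : pvLam xs = none ↔ xs = [] := by
  cases xs with
  | nil => simp [pvLam]
  | cons p t => simp [pvLam]; cases h : pvLam t <;> simp <;> split <;> simp

lemma pvLam_mem (xs : List (List (String × Int))) (m : List (String × Int)) (h : pvLam xs = some m) : m ∈ xs := by
  induction xs with
  | nil => simp [pvLam] at h
  | cons p t ih =>
    simp [pvLam] at h
    cases ht : pvLam t with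
    | none => rw [ht] at h; simp at h; simp [h]
    | some q =>
      rw [ht] at h; simp at h
      split at h
      · simp at h; simp [h]
      · simp at h; right; exact ih (h ▸ ht)

lemma pvLam_append (xs : List (List (String × Int))) (x : List (String × Int)) :
    pvLam (xs ++ [x]) = some (match pvLam xs with
      | none => x
      | some q => if pvAct x < pvAct q then q else x) := by
  induction xs with
  | nil => simp [pvLam]
  | cons p t ih =>
    rw [List.cons_append, pvLam, ih, pvLam]
    cases ht : pvLam t with
    | none => simp only; split_ifs <;> rfl
    | some q =>
      simp only []
      by_cases c1 : pvAct x < pvAct q <;> by_cases c2 : pvAct q < pvAct p <;>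
        simp [c1, c2] <;> (try split_ifs) <;> first | rfl | omega | (intro h; exact absurd h (by omega))

-- insertBy facts (bef = pvBef, the comparator sorted uses for key pvAct)
lemma insertBy_nil (x : List (String × Int)) : PySem.List.insertBy pvBef x [] = [x] := by
  simp [PySem.List.insertBy]

lemma insertBy_cons (x y : List (String × Int)) (ys : List (List (String × Int))) :
    PySem.List.insertBy pvBef x (y :: ys) =
      if pvBef x y then x :: y :: ys else y :: PySem.List.insertBy pvBef x ys := by
  simp [PySem.List.insertBy]

lemma insertBy_ne_nil (x : List (String × Int)) (ys : List (List (String × Int))) :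
    PySem.List.insertBy pvBef x ys ≠ [] := by
  cases ys with
  | nil => simp [insertBy_nil]
  | cons y t => rw [insertBy_cons]; split <;> simp

lemma insertBy_of_forall_bef (x : List (String × Int)) (ys : List (List (String × Int)))
    (h : ∀ z ∈ ys, pvBef x z = true) : PySem.List.insertBy pvBef x ys = x :: ys := by
  cases ys with
  | nil => simp [insertBy_nil]
  | cons y t => rw [insertBy_cons, if_pos (h y (by simp))]

lemma sorted_append_singleton (xs : List (List (String × Int))) (x : List (String × Int)) :
    PySem.List.sorted (xs ++ [x]) pvAct false =
      PySem.List.insertBy pvBef x (PySem.List.sorted xs pvAct false) := by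
  rw [PySem.List.sorted_eq_foldl_insertBy, PySem.List.sorted_eq_foldl_insertBy, List.foldl_append]
  rfl

lemma getLast?_insertBy (ys : List (List (String × Int)))
    (hs : ys.Pairwise (fun a b => pvAct a ≤ pvAct b)) (x : List (String × Int)) :
    (PySem.List.insertBy pvBef x ys).getLast? =
      some (match ys.getLast? with
        | none => x
        | some m => if pvAct x < pvAct m then m else x) := by
  induction ys with
  | nil => simp [insertBy_nil]
  | cons y t ih =>
    rw [insertBy_cons]
    by_cases hb : pvBef x y = true
    · rw [if_pos hb]
      cases ht : (y :: t).getLast? with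
      | none => simp at ht
      | some m =>
        have hm : m ∈ y :: t := List.mem_of_getLast? ht
        have hym : pvAct y ≤ pvAct m := by
          rcases List.mem_cons.1 hm with rfl | hm'
          · omega
          · exact (List.pairwise_cons.1 hs).1 m hm'
        have hx : pvAct x < pvAct y := by simpa [pvBef] using hb
        simp only []
        rw [if_pos (by omega), List.getLast?_cons_cons, ht]
    · rw [if_neg hb]
      have hx : ¬ pvAct x < pvAct y := by simpa [pvBef] using hb
      cases t with
      | nil => simp [insertBy_nil, if_neg hx]
      | cons z t' =>
        have ih' := ih (List.pairwise_cons.1 hs).2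
        obtain ⟨w, ws, hw⟩ := List.exists_cons_of_ne_nil (insertBy_ne_nil x (z :: t'))
        rw [hw, List.getLast?_cons_cons, ← hw, ih']
        cases ht : (z :: t').getLast? with
        | none => simp at ht
        | some m =>
          simp only []
          rw [List.getLast?_cons_cons, ht]

lemma getLast?_sorted (xs : List (List (String × Int))) :
    (PySem.List.sorted xs pvAct false).getLast? = pvLam xs := by
  induction xs using List.reverseRecOn with
  | nil => simp [pvLam]; decide
  | append_singleton t x ih =>
    rw [sorted_append_singleton, getLast?_insertBy _ (PySem.List.sorted_pairwise t pvAct), ih,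
      pvLam_append]

lemma filter_insertBy (P : List (String × Int) → Bool) (x : List (String × Int)) :
    ∀ ys : List (List (String × Int)), ys.Pairwise (fun a b => pvAct a ≤ pvAct b) →
    (PySem.List.insertBy pvBef x ys).filter P =
      if P x then PySem.List.insertBy pvBef x (ys.filter P) else ys.filter P := by
  intro ys
  induction ys with
  | nil => intro _; rw [insertBy_nil]; by_cases hP : P x = true <;> simp [hP, insertBy_nil]
  | cons y t ih =>
    intro hs
    rw [insertBy_cons]
    by_cases hb : pvBef x y = true
    · rw [if_pos hb]
      have hx : pvAct x < pvAct y := by simpa [pvBef] using hb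
      by_cases hPx : P x = true
      · rw [if_pos hPx]
        by_cases hPy : P y = true
        · simp [hPx, hPy, insertBy_cons, hb]
        · simp only [List.filter_cons, hPx, hPy, if_pos, Bool.false_eq_true, if_neg,
            not_false_iff]
          rw [insertBy_of_forall_bef]
          intro z hz
          have hz' : z ∈ t := List.mem_of_mem_filter hz
          have : pvAct y ≤ pvAct z := (List.pairwise_cons.1 hs).1 z hz'
          simp [pvBef]; omega
      · simp [List.filter_cons, hPx]
    · rw [if_neg hb]
      have ih' := ih (List.pairwise_cons.1 hs).2
      by_cases hPy : P y = true
      · simp only [List.filter_cons, hPy, if_pos, ih']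
        split
        · rw [insertBy_cons, if_neg hb]
        · rfl
      · simp only [List.filter_cons, hPy, Bool.false_eq_true, if_neg, not_false_iff, ih']

lemma sorted_filter (P : List (String × Int) → Bool) (xs : List (List (String × Int))) :
    (PySem.List.sorted xs pvAct false).filter P = PySem.List.sorted (xs.filter P) pvAct false := by
  induction xs using List.reverseRecOn with
  | nil => rfl
  | append_singleton t x ih =>
    rw [sorted_append_singleton, filter_insertBy P x _ (PySem.List.sorted_pairwise t pvAct),
      List.filter_append, ih]
    by_cases hPx : P x = true
    · simp [hPx, sorted_append_singleton]
    · simp [hPx]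

-- the B-side fold computes pvLamK
def pvPick (b? : Option Int) (a : List (String × Int)) (xs : List (List (String × Int))) : List (String × Int) :=
  match pvLamK b? xs with
  | none => a
  | some q => if pvGe (pvKey b? q) (pvKey b? a) then q else a

lemma pvPick_none (b? : Option Int) (a : List (String × Int)) (xs : List (List (String × Int)))
    (h : pvLamK b? xs = none) : pvPick b? a xs = a := by simp [pvPick, h]

lemma pvPick_some (b? : Option Int) (a q : List (String × Int)) (xs : List (List (String × Int)))
    (h : pvLamK b? xs = some q) :
    pvPick b? a xs = if pvGe (pvKey b? q) (pvKey b? a) then q else a := by simp [pvPick, h]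

lemma pvLamK_cons_none (b? : Option Int) (p : List (String × Int)) (t : List (List (String × Int)))
    (h : pvLamK b? t = none) : pvLamK b? (p :: t) = some p := by simp [pvLamK, h]

lemma pvLamK_cons_some (b? : Option Int) (p q : List (String × Int)) (t : List (List (String × Int)))
    (h : pvLamK b? t = some q) :
    pvLamK b? (p :: t) = some (if pvGt (pvKey b? p) (pvKey b? q) then p else q) := by
  simp [pvLamK, h]; split <;> rfl

lemma fold_eq_pick (b? : Option Int) :
    ∀ (xs : List (List (String × Int))) (a : List (String × Int)),
    (xs.foldl (fun st p => let k := pvKey b? p; if pvGe k st.2 then (p, k) else st)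
        (a, pvKey b? a)) = (pvPick b? a xs, pvKey b? (pvPick b? a xs)) := by
  intro xs
  induction xs with
  | nil => intro a; simp [pvPick, pvLamK]
  | cons p t ih =>
    intro a
    simp only [List.foldl_cons]
    by_cases hpa : pvGe (pvKey b? p) (pvKey b? a) = true
    · rw [if_pos hpa, ih p]
      cases ht : pvLamK b? t with
      | none =>
        rw [pvPick_none _ _ _ ht, pvPick_some _ _ _ _ (pvLamK_cons_none _ _ _ ht), if_pos hpa]
      | some q =>
        rw [pvPick_some _ _ _ _ ht, pvPick_some _ _ _ _ (pvLamK_cons_some _ _ _ _ ht)]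
        by_cases hqp : pvGe (pvKey b? q) (pvKey b? p) = true
        · have hgt : pvGt (pvKey b? p) (pvKey b? q) = false := by
            simp [pvGe, pvGt] at hqp ⊢; omega
          have hqa : pvGe (pvKey b? q) (pvKey b? a) = true := by
            simp [pvGe] at hqp hpa ⊢; omega
          simp [hqp, hgt, hqa]
        · have hgt : pvGt (pvKey b? p) (pvKey b? q) = true := by
            simp [pvGe, pvGt] at hqp ⊢; omega
          simp [hqp, hgt, hpa]
    · rw [if_neg hpa, ih a]
      cases ht : pvLamK b? t with
      | none =>
        rw [pvPick_none _ _ _ ht, pvPick_some _ _ _ _ (pvLamK_cons_none _ _ _ ht), if_neg hpa]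
      | some q =>
        rw [pvPick_some _ _ _ _ ht, pvPick_some _ _ _ _ (pvLamK_cons_some _ _ _ _ ht)]
        by_cases hgt : pvGt (pvKey b? p) (pvKey b? q) = true
        · have hqa : pvGe (pvKey b? q) (pvKey b? a) = false := by
            simp [pvGe, pvGt] at hgt hpa ⊢; omega
          simp [hgt, hqa, hpa]
        · simp [hgt]

lemma alt_eq_lamK (b? : Option Int) (p0 : List (String × Int)) (rest : List (List (String × Int))) :
    select_bbn_params_alt (p0 :: rest) b? = (pvLamK b? (p0 :: rest)).getD [] := by
  simp only [select_bbn_params_alt]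
  rw [fold_eq_pick b? rest p0]
  cases ht : pvLamK b? rest with
  | none => rw [pvPick_none _ _ _ ht, pvLamK_cons_none _ _ _ ht]; rfl
  | some q =>
    rw [pvPick_some _ _ _ _ ht, pvLamK_cons_some _ _ _ _ ht]
    by_cases h1 : pvGt (pvKey b? p0) (pvKey b? q) = true
    · have h2 : pvGe (pvKey b? q) (pvKey b? p0) = false := by
        simp [pvGe, pvGt] at h1 ⊢; omega
      simp [h1, h2]
    · have h2 : pvGe (pvKey b? q) (pvKey b? p0) = true := by
        simp [pvGe, pvGt] at h1 ⊢; omega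
      simp [h1, h2]

-- pvKey in terms of the filter predicates
lemma pvKey_some (bh : Int) (p : List (String × Int)) :
    pvKey (some bh) p = if pvP2 bh p then (2, pvAct p) else if pvP1 bh p then (1, pvAct p) else (0, pvAct p) := by
  simp only [pvKey, pvP2, pvP1]
  split_ifs with h1 h2 h3 h4 h5 <;> simp_all <;> omega

lemma pvLamK_none (xs : List (List (String × Int))) : pvLamK none xs = pvLam xs := by
  induction xs with
  | nil => rfl
  | cons p t ih =>
    simp only [pvLamK, pvLam, ih]
    cases pvLam t with
    | none => rfl
    | some q =>
      simp only [pvKey, pvGt]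
      split <;> split <;> simp_all <;> omega

-- the hierarchical structure of the lexicographic argmax
lemma pvLamK_some (bh : Int) (xs : List (List (String × Int))) :
    pvLamK (some bh) xs =
      match pvLam (xs.filter (pvP2 bh)) with
      | some m => some m
      | none =>
        match pvLam (xs.filter (pvP1 bh)) with
        | some m => some m
        | none => pvLam xs := by
  induction xs with
  | nil => rfl
  | cons p t ih =>
    by_cases h2 : pvP2 bh p = true
    · -- rank 2
      have hP1 : pvP1 bh p = true := by simp [pvP2, pvP1] at h2 ⊢; omega
      simp only [pvLamK, ih, List.filter_cons, h2, if_pos, pvLam]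
      cases hf2 : pvLam (t.filter (pvP2 bh)) with
      | none =>
        simp only []
        cases hf1 : pvLam (t.filter (pvP1 bh)) with
        | none =>
          cases hall : pvLam t with
          | none => rfl
          | some q =>
            -- no element of t satisfies P1, so q has rank 0 < 2
            have hq : q ∈ t := pvLam_mem t q hall
            have hq1 : pvP1 bh q = false := by
              by_contra hc
              have : q ∈ t.filter (pvP1 bh) := List.mem_filter.2 ⟨hq, by simpa using hc⟩
              rw [(pvLam_eq_none _).1 hf1] at this; simp at this
            have : pvGt (pvKey (some bh) p) (pvKey (some bh) q) = true := by
              rw [pvKey_some, pvKey_some, if_pos h2]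
              have hq2 : pvP2 bh q = false := by
                simp [pvP2, pvP1] at hq1 ⊢; omega
              rw [if_neg (by simp [hq2]), if_neg (by simp [hq1])]
              simp [pvGt]
            simp [this]
        | some q =>
          -- q has rank 1 (P1 but no P2 in t)
          have hq : q ∈ t.filter (pvP1 bh) := pvLam_mem _ q hf1
          have hq1 : pvP1 bh q = true := (List.mem_filter.1 hq).2
          have hq2 : pvP2 bh q = false := by
            by_contra hc
            have : q ∈ t.filter (pvP2 bh) := List.mem_filter.2 ⟨(List.mem_filter.1 hq).1, by simpa using hc⟩
            rw [(pvLam_eq_none _).1 hf2] at this; simp at this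
          have : pvGt (pvKey (some bh) p) (pvKey (some bh) q) = true := by
            rw [pvKey_some, pvKey_some, if_pos h2, if_neg (by simp [hq2]), if_pos hq1]
            simp [pvGt]
          simp [this]
      | some q =>
        -- q has rank 2: compare activations, same test as pvLam on the filtered list
        have hq : q ∈ t.filter (pvP2 bh) := pvLam_mem _ q hf2
        have hq2 : pvP2 bh q = true := (List.mem_filter.1 hq).2
        have hk : pvGt (pvKey (some bh) p) (pvKey (some bh) q) = decide (pvAct q < pvAct p) := by
          rw [pvKey_some, pvKey_some, if_pos h2, if_pos hq2]
          simp [pvGt]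
        simp only [hk]
        by_cases hc : pvAct q < pvAct p <;> simp [hc]
    · by_cases h1 : pvP1 bh p = true
      · -- rank 1
        simp only [pvLamK, ih, List.filter_cons, h2, h1, if_pos, Bool.false_eq_true, if_neg,
          not_false_iff, pvLam]
        cases hf2 : pvLam (t.filter (pvP2 bh)) with
        | none =>
          simp only []
          cases hf1 : pvLam (t.filter (pvP1 bh)) with
          | none =>
            cases hall : pvLam t with
            | none => rfl
            | some q =>
              have hq : q ∈ t := pvLam_mem t q hall
              have hq1 : pvP1 bh q = false := by
                by_contra hc
                have : q ∈ t.filter (pvP1 bh) := List.mem_filter.2 ⟨hq, by simpa using hc⟩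
                rw [(pvLam_eq_none _).1 hf1] at this; simp at this
              have hq2 : pvP2 bh q = false := by simp [pvP2, pvP1] at hq1 ⊢; omega
              have : pvGt (pvKey (some bh) p) (pvKey (some bh) q) = true := by
                rw [pvKey_some, pvKey_some, if_neg (by simp [h2]), if_pos h1,
                  if_neg (by simp [hq2]), if_neg (by simp [hq1])]
                simp [pvGt]
              simp [this]
          | some q =>
            have hq : q ∈ t.filter (pvP1 bh) := pvLam_mem _ q hf1
            have hq1 : pvP1 bh q = true := (List.mem_filter.1 hq).2
            have hq2 : pvP2 bh q = false := by
              by_contra hc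
              have : q ∈ t.filter (pvP2 bh) := List.mem_filter.2 ⟨(List.mem_filter.1 hq).1, by simpa using hc⟩
              rw [(pvLam_eq_none _).1 hf2] at this; simp at this
            have hk : pvGt (pvKey (some bh) p) (pvKey (some bh) q) = decide (pvAct q < pvAct p) := by
              rw [pvKey_some, pvKey_some, if_neg (by simp [h2]), if_pos h1,
                if_neg (by simp [hq2]), if_pos hq1]
              simp [pvGt]
            simp only [hk]
            by_cases hc : pvAct q < pvAct p <;> simp [hc]
        | some q =>
          -- q has rank 2 > 1: q stays
          have hq : q ∈ t.filter (pvP2 bh) := pvLam_mem _ q hf2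
          have hq2 : pvP2 bh q = true := (List.mem_filter.1 hq).2
          have : pvGt (pvKey (some bh) p) (pvKey (some bh) q) = false := by
            rw [pvKey_some, pvKey_some, if_neg (by simp [h2]), if_pos h1, if_pos hq2]
            simp [pvGt]
          simp [this]
      · -- rank 0
        simp only [pvLamK, ih, List.filter_cons, h2, h1, Bool.false_eq_true, if_neg,
          not_false_iff, pvLam]
        cases hf2 : pvLam (t.filter (pvP2 bh)) with
        | none =>
          simp only []
          cases hf1 : pvLam (t.filter (pvP1 bh)) with
          | none =>
            cases hall : pvLam t with
            | none => rfl
            | some q =>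
              have hq : q ∈ t := pvLam_mem t q hall
              have hq1 : pvP1 bh q = false := by
                by_contra hc
                have : q ∈ t.filter (pvP1 bh) := List.mem_filter.2 ⟨hq, by simpa using hc⟩
                rw [(pvLam_eq_none _).1 hf1] at this; simp at this
              have hq2 : pvP2 bh q = false := by simp [pvP2, pvP1] at hq1 ⊢; omega
              have hk : pvGt (pvKey (some bh) p) (pvKey (some bh) q) = decide (pvAct q < pvAct p) := by
                rw [pvKey_some, pvKey_some, if_neg (by simp [h2]), if_neg (by simp [h1]),
                  if_neg (by simp [hq2]), if_neg (by simp [hq1])]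
                simp [pvGt]
              simp only [hk]
              by_cases hc : pvAct q < pvAct p <;> simp [hc]
          | some q =>
            have hq : q ∈ t.filter (pvP1 bh) := pvLam_mem _ q hf1
            have hq1 : pvP1 bh q = true := (List.mem_filter.1 hq).2
            have hq2 : pvP2 bh q = false := by
              by_contra hc
              have : q ∈ t.filter (pvP2 bh) := List.mem_filter.2 ⟨(List.mem_filter.1 hq).1, by simpa using hc⟩
              rw [(pvLam_eq_none _).1 hf2] at this; simp at this
            have : pvGt (pvKey (some bh) p) (pvKey (some bh) q) = false := by
              rw [pvKey_some, pvKey_some, if_neg (by simp [h2]), if_neg (by simp [h1]),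
                if_neg (by simp [hq2]), if_pos hq1]
              simp [pvGt]
            simp [this]
        | some q =>
          have hq : q ∈ t.filter (pvP2 bh) := pvLam_mem _ q hf2
          have hq2 : pvP2 bh q = true := (List.mem_filter.1 hq).2
          have : pvGt (pvKey (some bh) p) (pvKey (some bh) q) = false := by
            rw [pvKey_some, pvKey_some, if_neg (by simp [h2]), if_neg (by simp [h1]), if_pos hq2]
            simp [pvGt]
          simp [this]

-- xs[-1] of a sorted list is the last argmax
lemma pyGetD_sorted (xs : List (List (String × Int))) (h : xs ≠ []) :
    PySem.List.pyGetD (PySem.List.sorted xs pvAct false) (-1) ([] : List (String × Int)) =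
      (pvLam xs).getD [] := by
  have hs : PySem.List.sorted xs pvAct false ≠ [] := by
    simpa [PySem.List.sorted_eq_nil_iff] using h
  rw [PySem.List.pyGetD_neg_one _ _ hs]
  cases hm : pvLam xs with
  | none => exact absurd ((pvLam_eq_none _).1 hm) h
  | some m =>
    have h2 := getLast?_sorted xs
    rw [hm] at h2
    simp only [Option.getD_some]
    exact List.getLast_of_mem_getLast? h2

-- ===== VERDICT (by name: the statement is the Claim_ definition above) =====
theorem select_bbn_params_spec : Claim_equal_select_bbn_params := by
  intro bbn_list block_height _ hpre
  unfold Spec_select_bbn_params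
  unfold Pre_select_bbn_params at hpre
  obtain ⟨p0, rest, rfl⟩ : ∃ p0 rest, bbn_list = p0 :: rest := by
    cases bbn_list with
    | nil => exact absurd rfl hpre
    | cons a t => exact ⟨a, t, rfl⟩
  rw [alt_eq_lamK]
  cases block_height with
  | none =>
    show PySem.List.pyGetD (PySem.List.sorted (p0 :: rest) pvAct false) (-1) [] =
      (pvLamK none (p0 :: rest)).getD []
    rw [pvLamK_none, pyGetD_sorted _ hpre]
  | some bh =>
    show (if ((PySem.List.sorted (p0 :: rest) pvAct false).foldl
          (fun acc p => if pvAct p ≤ bh ∧ (pvExp p = 0 ∨ bh ≤ pvExp p) then acc ++ [p] else acc) []) ≠ [] then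
        PySem.List.pyGetD (PySem.List.sorted ((PySem.List.sorted (p0 :: rest) pvAct false).foldl
          (fun acc p => if pvAct p ≤ bh ∧ (pvExp p = 0 ∨ bh ≤ pvExp p) then acc ++ [p] else acc) []) pvAct false) (-1) []
      else if ((PySem.List.sorted (p0 :: rest) pvAct false).filter (fun p => decide (pvAct p ≤ bh))) ≠ [] then
        PySem.List.pyGetD (PySem.List.sorted ((PySem.List.sorted (p0 :: rest) pvAct false).filter (fun p => decide (pvAct p ≤ bh))) pvAct false) (-1) []
      else PySem.List.pyGetD (PySem.List.sorted (p0 :: rest) pvAct false) (-1) []) =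
      (pvLamK (some bh) (p0 :: rest)).getD []
    rw [pvLamK_some]
    rw [PySem.List.foldl_append_ite_eq_filter]
    have hcand : (PySem.List.sorted (p0 :: rest) pvAct false).filter (fun p => decide (pvAct p ≤ bh ∧ (pvExp p = 0 ∨ bh ≤ pvExp p))) = PySem.List.sorted ((p0 :: rest).filter (pvP2 bh)) pvAct false := by
      rw [← sorted_filter]; rfl
    have hpast : (PySem.List.sorted (p0 :: rest) pvAct false).filter (fun p => decide (pvAct p ≤ bh)) = PySem.List.sorted ((p0 :: rest).filter (pvP1 bh)) pvAct false := by
      rw [← sorted_filter]; rfl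
    rw [List.nil_append, hcand]
    by_cases h2 : (p0 :: rest).filter (pvP2 bh) = []
    · rw [if_neg (by simp [PySem.List.sorted_eq_nil_iff, h2]), hpast]
      have hf2 : pvLam ((p0 :: rest).filter (pvP2 bh)) = none := by rw [h2]; rfl
      rw [hf2]
      by_cases h1 : (p0 :: rest).filter (pvP1 bh) = []
      · rw [if_neg (by simp [PySem.List.sorted_eq_nil_iff, h1])]
        have hf1 : pvLam ((p0 :: rest).filter (pvP1 bh)) = none := by rw [h1]; rfl
        rw [hf1, pyGetD_sorted _ hpre]
      · rw [if_pos (by simpa [PySem.List.sorted_eq_nil_iff] using h1)]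
        rw [PySem.List.sorted_sorted, pyGetD_sorted _ h1]
        cases hf1 : pvLam ((p0 :: rest).filter (pvP1 bh)) with
        | none => exact absurd ((pvLam_eq_none _).1 hf1) h1
        | some m => rfl
    · rw [if_pos (by simpa [PySem.List.sorted_eq_nil_iff] using h2)]
      rw [PySem.List.sorted_sorted, pyGetD_sorted _ h2]
      cases hf2 : pvLam ((p0 :: rest).filter (pvP2 bh)) with
      | none => exact absurd ((pvLam_eq_none _).1 hf2) h2
      | some m => rfl
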